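-- pv_equiv track=rewrite | github.com/sorbetlemon16/hb-assessments | solutions/skills-3-solution/dicts.py | create_word_chain
-- ===== SOURCE A (Python) =====
-- def create_word_chain(words):
--     """Return a sequence of words arranged according to the rules below.
--
--     The sequence starts with the first word in the given list. The
--     next word will start with the last letter of the preceding word.
--     For example, these are all valid sequences of words:
--
--         zoo, octos, sour, racket
--         cute, etcetera, antsy, yak, karat
--
--     Sometimes you'll get a word where there are multiple candidates
--     for the next word. For example, if our list of words contains:
--
--         noon, naan, nun
--
--     ...then the first word in the sequence is 'noon':
--
--         noon
--
--     ...the next word should be the *first* word that starts with 'n'.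
--     So, even though 'naan' and 'nun' both start with 'n', the next
--     word should be 'naan' because 'naan' appears before 'nun'. The
--     final sequence of words will be:
--
--         noon, naan, nun
--
--     The sequence will continue in this fashion until it runs out of
--     words or it can't find words that'll fit the pattern.
--     """
--
--     # Handle edge case where words is an empty list
--     if not words:
--         return []
--
--     # Separate the first word in words from the rest of the words so
--     # we can use first_word to start the sequence and process
--     # rest_words later
--     first_word = words[0]
--     rest_words = words[1:]
--     # You can also do this in one line with:
--     # first_word, *rest_words = words
--
--     sequence = [first_word]
--
--     # Process the rest of the words into a dictionary that'll be used
--     # as a lookup table. We want to look for words that start with a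
--     # certain letter so the keys of this dictionary will be first letters
--     # and values will be list of words that start with that letter.
--     words_lookup = {}
--     for word in rest_words:
--         first_letter = word[0]
--
--         if first_letter not in words_lookup:
--             words_lookup[first_letter] = []
--
--         words_lookup[first_letter].append(word)
--
--     while True:
--         # Find the next word using the last char of the latest
--         # item added to sequence
--         next_word_key = sequence[-1][-1]
--
--         next_words = words_lookup.get(next_word_key)
--         if next_words:
--             # next_words.pop(0) will remove and return the
--             # element at index 0
--             sequence.append(next_words.pop(0))
--         else:
--             # We're finished building the sequence when next_words
--             # is None (because next_word_key doesn't exist in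
--             # words_lookup) or when next_words is [] (when we've
--             # used up all words that start with next_word_key).
--             return sequence
-- ===== SOURCE B (Python) =====
-- def create_word_chain(words):
--     if not words:
--         return []
--     rest = words[1:]
--     chain = [words[0]]
--     start = {}  # per-key monotone resume position into the immutable rest list
--     while True:
--         key = chain[-1][-1:]
--         i = start.get(key, 0)
--         while i < len(rest) and rest[i][:1] != key:
--             i += 1
--         if i == len(rest):
--             return chain
--         chain.append(rest[i])
--         start[key] = i + 1
-- ===== Notes on version B (the rewrite author's own statement) =====
-- stated objective: alternative
-- what changed: Replaced A's mutable dict of per-letter word queues (grouping pass + pop(0) per step) with a single immutable rest list plus a dict of monotone per-key resume indices: each step scans forward from the key's frontier, which is correct because words with a given first letter are consumed strictly left-to-right, so nothing is ever grouped, removed or marked.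
import Mathlib
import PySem

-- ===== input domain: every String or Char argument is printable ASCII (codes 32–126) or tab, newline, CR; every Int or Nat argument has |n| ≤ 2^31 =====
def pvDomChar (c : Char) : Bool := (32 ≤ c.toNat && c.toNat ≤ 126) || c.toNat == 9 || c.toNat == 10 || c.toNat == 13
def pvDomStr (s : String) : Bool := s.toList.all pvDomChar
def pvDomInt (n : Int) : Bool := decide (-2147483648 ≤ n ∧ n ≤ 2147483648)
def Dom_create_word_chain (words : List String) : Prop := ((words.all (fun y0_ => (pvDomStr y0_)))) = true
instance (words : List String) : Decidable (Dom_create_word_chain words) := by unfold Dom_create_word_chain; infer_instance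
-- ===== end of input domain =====

-- B drops A's dict of per-letter word queues (built by a grouping pass and consumed by
-- pop(0)) and instead keeps the rest list immutable with a dict of monotone per-key
-- resume indices, scanning forward from the key's frontier each step. Proved equal on Pre_.

-- ===== PORT A =====
-- word[0] and sequence[-1][-1]: the `none` (empty-string) case, where Python raises
-- IndexError, is excluded by Pre_ and defaulted here.
def pvFirst (w : String) : Char := (PySem.Str.pyGet? w 0).getD ' '
def pvLastChar (seq : List String) : Char :=
  (PySem.Str.pyGet? ((PySem.List.pyGet? seq (-1)).getD "") (-1)).getD ' '

-- the `while True` loop; each iteration pops one word or returns, so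
-- rest_words.length + 1 fuel always reaches the return branch
def pvA_loop : Nat → List String → PySem.Dict Char (List String) → List String
  | 0, seq, _ => seq
  | n+1, seq, lookup =>
    let key := pvLastChar seq
    match lookup.get? key with
    | some (w :: ws) => pvA_loop n (seq ++ [w]) (lookup.insert key ws)  -- next_words.pop(0)
    | _ => seq

def create_word_chain (words : List String) : List String :=
  match words with
  | [] => []
  | first_word :: rest_words =>
    let lookup := rest_words.foldl (fun d word =>
      let c := pvFirst word
      let d := if (d.get? c).isSome then d else d.insert c []
      d.modify c [] (fun l => l ++ [word])) PySem.Dict.empty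
    pvA_loop (rest_words.length + 1) [first_word] lookup

-- ===== PORT B =====
def pvTake1 (w : String) : String := PySem.Str.slice w none (some 1)      -- w[:1]
def pvLast1 (w : String) : String := PySem.Str.slice w (some (-1)) none   -- w[-1:]

-- the inner `while i < len(rest) and rest[i][:1] != key: i += 1`, walking the
-- suffix rest[i:] structurally while counting i up
def pvB_scanGo (key : String) : List String → Nat → Nat
  | [], i => i
  | w :: ws, i => if pvTake1 w ≠ key then pvB_scanGo key ws (i+1) else i

def pvB_scan (rest : List String) (key : String) (i : Nat) : Nat :=
  pvB_scanGo key (rest.drop i) i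

-- the outer `while True` loop over (chain, start); one word of rest is appended per
-- iteration or the chain is returned, so rest.length + 1 fuel suffices
def pvB_loop (rest : List String) : Nat → List String → PySem.Dict String Nat → List String
  | 0, chain, _ => chain
  | n+1, chain, start =>
    let key := pvLast1 (PySem.List.pyGetD chain (-1) "")
    let i := pvB_scan rest key (start.getD key 0)
    if i = rest.length then chain
    else pvB_loop rest n (chain ++ [rest.getD i ""]) (start.insert key (i+1))

def create_word_chain_alt (words : List String) : List String :=
  match words with
  | [] => []
  | w :: rest => pvB_loop rest (rest.length + 1) [w] PySem.Dict.empty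

-- ===== PRECONDITION & SPEC =====
-- Pre_ excludes only inputs where Python A raises IndexError: a nonempty list containing "".
def Pre_create_word_chain (words : List String) : Prop :=
  words = [] ∨ ∀ w ∈ words, w ≠ ""
instance (words : List String) : Decidable (Pre_create_word_chain words) := by
  unfold Pre_create_word_chain; infer_instance

def pvWitness_create_word_chain : List String := ["zoo", "octos", "sour", "racket"]

def Spec_create_word_chain (words : List String) (out : List String) : Prop := out = create_word_chain_alt words
instance (words : List String) (out : List String) : Decidable (Spec_create_word_chain words out) := by unfold Spec_create_word_chain; infer_instance

-- ===== CLAIM (what is proved, stated in full; the proofs are below) =====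
def Claim_equal_create_word_chain : Prop := ∀ (words : List String), Dom_create_word_chain words → Pre_create_word_chain words → Spec_create_word_chain words (create_word_chain words)

-- ===== LEMMAS AND PROOFS =====

-- A's dict-building pass groups the rest words by first letter, in order
lemma pv_build_getD (l : List String) (d : PySem.Dict Char (List String)) (c : Char) :
    ((l.foldl (fun d word =>
      let c := pvFirst word
      let d := if (d.get? c).isSome then d else d.insert c []
      d.modify c [] (fun l => l ++ [word])) d).getD c [])
      = d.getD c [] ++ l.filter (fun w => pvFirst w == c) := by
  induction l generalizing d with
  | nil => simp
  | cons w t ih =>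
    simp only [List.foldl_cons, List.filter_cons, ih]
    have hsd : ∀ c', ((if ((d.get? (pvFirst w)).isSome) then d else d.insert (pvFirst w) []).getD c' [])
        = d.getD c' [] := by
      intro c'
      by_cases hs : (d.get? (pvFirst w)).isSome
      · simp [hs]
      · rw [if_neg hs, PySem.Dict.getD_insert]
        split_ifs with hc
        · rw [hc, PySem.Dict.getD_eq_get?_getD, Option.not_isSome_iff_eq_none.mp hs]
          rfl
        · rfl
    rw [PySem.Dict.getD_modify]
    by_cases hc : c = pvFirst w
    · subst hc
      simp [hsd]
    · have : ¬ (pvFirst w == c) = true := by simpa [beq_iff_eq] using fun h => hc h.symm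
      simp [hc, hsd, this]

-- string facts: equality via toList, word[:1] and word[-1:] of a nonempty word
lemma pv_str_ext {s t : String} (h : s.toList = t.toList) : s = t := by
  have := congrArg String.ofList h; simpa using this

lemma pv_toList_ne {s : String} (h : s ≠ "") : s.toList ≠ [] := by
  simpa [String.toList_eq_nil_iff] using h

lemma pv_first_eq (s : String) (c : Char) (cs : List Char) (h : s.toList = c :: cs) :
    pvFirst s = c := by
  simp [pvFirst, h, PySem.List.pyGet?, PySem.List.pyIdx?]

lemma pv_last1_toList (s : String) (h : s.toList ≠ []) :
    (pvLast1 s).toList = [s.toList.getLast h] := by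
  simp only [pvLast1, PySem.Str.toList_slice, PySem.Chars.slice_eq_listSlice,
    PySem.List.slice_from_neg_one]
  exact List.drop_length_sub_one h

lemma pv_take1_toList (s : String) : (pvTake1 s).toList = s.toList.take 1 := by
  simp [pvTake1, PySem.List.slice_to]

-- w[:1] == key-singleton iff w's first char is c, for w ≠ ""
lemma pv_take1_eq_iff (w : String) (hw : w ≠ "") (c : Char) :
    pvTake1 w = String.ofList [c] ↔ pvFirst w = c := by
  obtain ⟨a, cs, hac⟩ : ∃ a cs, w.toList = a :: cs := by
    cases hl : w.toList with
    | nil => exact absurd hl (pv_toList_ne hw)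
    | cons a cs => exact ⟨a, cs, rfl⟩
  rw [pv_first_eq w a cs hac]
  constructor
  · intro h
    have := congrArg String.toList h
    rw [pv_take1_toList, hac] at this
    simpa using this
  · intro h
    subst h
    refine pv_str_ext ?_
    rw [pv_take1_toList, hac]
    simp

-- on all-nonempty lists the string-key filter is the char filter
lemma pv_filter_eq (l : List String) (hl : ∀ w ∈ l, w ≠ "") (c : Char) :
    l.filter (fun w => pvTake1 w == String.ofList [c]) = l.filter (fun w => pvFirst w == c) :=
  List.filter_congr fun w hw => by
    by_cases h1 : pvFirst w = c
    · simp [h1, (pv_take1_eq_iff w (hl w hw) c).mpr h1]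
    · have h2 : ¬ pvTake1 w = String.ofList [c] := fun h => h1 ((pv_take1_eq_iff w (hl w hw) c).mp h)
      simp [h1, h2]

-- B's key string is the singleton of A's key char (chain nonempty, last word nonempty)
lemma pv_key_eq (chain : List String) (hch : chain ≠ []) (hv : chain.getLast hch ≠ "") :
    pvLast1 (PySem.List.pyGetD chain (-1) "") = String.ofList [pvLastChar chain] := by
  have hget : PySem.List.pyGetD chain (-1) "" = chain.getLast hch :=
    PySem.List.pyGetD_neg_one chain "" hch
  have hne := pv_toList_ne hv
  refine pv_str_ext ?_
  rw [hget, pv_last1_toList _ hne]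
  have hlast : pvLastChar chain = (chain.getLast hch).toList.getLast hne := by
    have h1 : (PySem.List.pyGet? chain (-1)).getD "" = chain.getLast hch := hget
    unfold pvLastChar
    rw [h1]
    have := PySem.List.pyGetD_neg_one (xs := (chain.getLast hch).toList) ' ' hne
    simp [PySem.List.pyGetD] at this
    simp [this]
  rw [hlast]
  simp

-- inner-while characterisation: no remaining match → scan runs to the end
lemma pv_scanGo_nil (key : String) (l : List String) (i : Nat)
    (h : l.filter (fun w => pvTake1 w == key) = []) :
    pvB_scanGo key l i = i + l.length := by
  induction l generalizing i with
  | nil => simp [pvB_scanGo]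
  | cons a as ih =>
    simp only [List.filter_cons] at h
    by_cases ha : pvTake1 a = key
    · simp [ha] at h
    · have hb : ¬ (pvTake1 a == key) = true := by simpa [beq_iff_eq] using ha
      simp only [hb] at h
      simp only [pvB_scanGo, if_pos ha]
      rw [ih _ h]
      simp
      omega

-- inner-while characterisation: scan stops exactly at the first match
lemma pv_scanGo_cons (key : String) (l : List String) (i : Nat) (w : String) (ws : List String)
    (h : l.filter (fun x => pvTake1 x == key) = w :: ws) :
    ∃ k, k < l.length ∧ pvB_scanGo key l i = i + k ∧ l.getD k "" = w ∧
      (l.drop (k+1)).filter (fun x => pvTake1 x == key) = ws := by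
  induction l generalizing i w ws with
  | nil => simp at h
  | cons a as ih =>
    simp only [List.filter_cons] at h
    by_cases ha : pvTake1 a = key
    · have hb : (pvTake1 a == key) = true := by simpa [beq_iff_eq] using ha
      simp only [hb, if_true] at h
      rw [List.cons.injEq] at h
      obtain ⟨rfl, hft⟩ := h
      exact ⟨0, by simp, by simp [pvB_scanGo, ha], rfl, by simpa using hft⟩
    · have hb : ¬ (pvTake1 a == key) = true := by simpa [beq_iff_eq] using ha
      simp only [hb] at h
      obtain ⟨k, hk, hscan, hget, hfilt⟩ := ih (i+1) w ws h
      refine ⟨k+1, by simpa using Nat.succ_lt_succ hk, ?_, by simpa using hget, by simpa using hfilt⟩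
      simp only [pvB_scanGo, if_pos ha]
      rw [hscan]
      omega

-- main loop invariant: A's bucket for letter c is exactly the c-filtered suffix of
-- rest beyond B's frontier for the singleton key of c; then both loops take the
-- same step with the same fuel
lemma pv_loop_eq (rest : List String) (hrest : ∀ w ∈ rest, w ≠ "") (n : Nat) :
    ∀ (chain : List String) (d : PySem.Dict Char (List String)) (start : PySem.Dict String Nat),
      chain ≠ [] → (∀ w ∈ chain, w ≠ "") →
      (∀ s : String, start.getD s 0 ≤ rest.length) →
      (∀ c : Char, d.getD c []
        = (rest.drop (start.getD (String.ofList [c]) 0)).filter (fun w => pvFirst w == c)) →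
      pvA_loop n chain d = pvB_loop rest n chain start := by
  induction n with
  | zero => intro chain d start _ _ _ _; rfl
  | succ n ih =>
    intro chain d start hch hcw hb hinv
    have hv : chain.getLast hch ≠ "" := hcw _ (List.getLast_mem hch)
    have hkey := pv_key_eq chain hch hv
    set c := pvLastChar chain with hc
    set keyS := String.ofList [c] with hks
    set i0 := start.getD keyS 0 with hi0
    have hdropne : ∀ w ∈ rest.drop i0, w ≠ "" := fun w hw => hrest w (List.mem_of_mem_drop hw)
    have hbucket : d.getD c [] = (rest.drop i0).filter (fun w => pvFirst w == c) := hinv c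
    have hfeq : (rest.drop i0).filter (fun w => pvTake1 w == keyS)
        = (rest.drop i0).filter (fun w => pvFirst w == c) := pv_filter_eq _ hdropne c
    simp only [pvA_loop, pvB_loop, hkey, ← hc, ← hi0]
    cases hf : (rest.drop i0).filter (fun w => pvFirst w == c) with
    | nil =>
      -- A returns: its bucket is none or some []
      have hd : d.getD c [] = [] := hbucket.trans hf
      have hscan : pvB_scan rest keyS i0 = rest.length := by
        unfold pvB_scan
        rw [pv_scanGo_nil _ _ _ (hfeq.trans hf)]
        have : i0 ≤ rest.length := hb keyS
        simp
        omega
      rw [hscan, if_pos rfl]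
      rw [PySem.Dict.getD_eq_get?_getD] at hd
      cases hg : d.get? c with
      | none => simp
      | some l =>
        rw [hg] at hd
        simp at hd
        subst hd
        simp
    | cons w ws =>
      -- both consume w: A pops its bucket, B advances the frontier past w
      have hd : d.get? c = some (w :: ws) := by
        have := hbucket.trans hf
        rw [PySem.Dict.getD_eq_get?_getD] at this
        cases hg : d.get? c with
        | none => simp [hg] at this
        | some l => rw [hg] at this; simp at this; rw [this]
      obtain ⟨k, hk, hscan, hget, hfilt⟩ := pv_scanGo_cons keyS (rest.drop i0) i0 w ws (hfeq.trans hf)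
      have hi0le : i0 ≤ rest.length := hb keyS
      have hklen : k < rest.length - i0 := by simpa using hk
      have hscan' : pvB_scan rest keyS i0 = i0 + k := by
        unfold pvB_scan; exact hscan
      have hlt : i0 + k < rest.length := by omega
      rw [hscan', if_neg (by omega), hd]
      have hgetw : rest.getD (i0 + k) "" = w := by
        have : (rest.drop i0).getD k "" = rest.getD (i0 + k) "" := by
          simp [List.getD, List.getElem?_drop]
        rw [← this, hget]
      rw [hgetw]
      have hwmem : w ∈ rest := by
        have : w ∈ rest.drop i0 := by
          rw [← hget]
          rw [List.getD_eq_getElem _ _ hk]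
          exact List.getElem_mem hk
        exact List.mem_of_mem_drop this
      apply ih
      · simp
      · intro x hx
        rcases List.mem_append.mp hx with hx | hx
        · exact hcw x hx
        · rw [List.mem_singleton.mp hx]; exact hrest w hwmem
      · intro s
        rw [PySem.Dict.getD_insert]
        split_ifs with hs
        · omega
        · exact hb s
      · intro c'
        rw [PySem.Dict.getD_insert, PySem.Dict.getD_insert]
        have hkeq : (String.ofList [c'] = keyS) ↔ (c' = c) := by
          rw [hks]
          constructor
          · intro h
            have := congrArg String.toList h
            simpa using this
          · intro h; rw [h]
        by_cases hcc : c' = c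
        · rw [if_pos hcc, if_pos (hkeq.mpr hcc), hcc]
          have hdd : rest.drop (i0 + k + 1) = (rest.drop i0).drop (k+1) := by
            rw [List.drop_drop]
            ring_nf
          rw [hdd]
          have hne' : ∀ x ∈ (rest.drop i0).drop (k+1), x ≠ "" :=
            fun x hx => hdropne x (List.mem_of_mem_drop hx)
          rw [← pv_filter_eq _ hne' c, hfilt]
        · rw [if_neg hcc, if_neg (fun h => hcc (hkeq.mp h))]
          exact hinv c'

theorem pv_main (words : List String) (hpre : Pre_create_word_chain words) :
    create_word_chain words = create_word_chain_alt words := by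
  cases words with
  | nil => rfl
  | cons w rest =>
    have hall : ∀ x ∈ (w :: rest), x ≠ "" := by
      rcases hpre with h | h
      · simp at h
      · exact h
    simp only [create_word_chain, create_word_chain_alt]
    apply pv_loop_eq rest (fun x hx => hall x (List.mem_cons_of_mem _ hx))
    · simp
    · intro x hx
      rw [List.mem_singleton.mp hx]
      exact hall w List.mem_cons_self
    · intro s
      simp [PySem.Dict.getD, PySem.Dict.get?, PySem.Dict.empty]
    · intro c
      rw [pv_build_getD]
      simp [PySem.Dict.getD, PySem.Dict.get?, PySem.Dict.empty]

-- ===== VERDICT (by name: the statement is the Claim_ definition above) =====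
theorem create_word_chain_spec : Claim_equal_create_word_chain := by
  intro words _ hpre
  unfold Spec_create_word_chain
  exact pv_main words hpre
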